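-- pv_equiv track=rewrite | github.com/hanleychan/problemSolving | projectEuler/pandigital_products.py | one_through_nine_pandigital
-- ===== SOURCE A (Python) =====
-- from math import sqrt
--
-- def get_multiplicand_and_multiplier(number):
--     """ Returns a list of multiplicand and multiplier values that equal to the number """
--     result = []
--
--     for i in range(1, int(sqrt(number))+1):
--         if number % i == 0:
--             result.append((i, int(number/i)))
--
--     return result
--
-- def one_through_nine_pandigital(number):
--     """ Returns whether the combination of multiplicand, multiplier and product is pandigital """
--     numbers_list = []
--     numbers = get_multiplicand_and_multiplier(number)
--
--     for digit in str(number):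
--         if int(digit) in numbers_list or int(digit) == 0:
--             return False
--         else:
--             numbers_list.append(int(digit))
--
--     for num_1, num_2 in numbers:
--         temp_numbers_list = numbers_list[:]
--
--         restart = False
--         for digit in str(num_1):
--             if int(digit) in temp_numbers_list or int(digit) == 0:
--                 restart = True
--                 break
--             else:
--                 temp_numbers_list.append(int(digit))
--
--         if restart:
--             continue
--
--         for digit in str(num_2):
--             if int(digit) in temp_numbers_list or int(digit) == 0:
--                 restart = True
--                 break
--             else:
--                 temp_numbers_list.append(int(digit))
--
--         if restart:
--             continue
--
--         if len(temp_numbers_list) == 9: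
--             return True
--     else:
--         return False
-- ===== SOURCE B (Python) =====
-- from math import sqrt
--
-- def one_through_nine_pandigital(number):
--     """ Returns whether the combination of multiplicand, multiplier and product is pandigital """
--     pairs = [(i, number // i) for i in range(1, int(sqrt(number)) + 1) if number % i == 0]
--     seen = []
--     for digit in str(number):
--         d = int(digit)
--         if d in seen or d == 0:
--             return False
--         seen.append(d)
--     s = str(number)
--     return any(''.join(sorted(s + str(a) + str(b))) == '123456789' for a, b in pairs)
-- ===== Notes on version B (the rewrite author's own statement) =====
-- stated objective: simpler
-- what changed: B builds the factor pairs with a comprehension and replaces A's two nested early-abort membership loops per pair by a single sort-and-compare of the concatenated digit string against '123456789' inside an any(); only the early-returning validation of the number's own digits is kept.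
import Mathlib
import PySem

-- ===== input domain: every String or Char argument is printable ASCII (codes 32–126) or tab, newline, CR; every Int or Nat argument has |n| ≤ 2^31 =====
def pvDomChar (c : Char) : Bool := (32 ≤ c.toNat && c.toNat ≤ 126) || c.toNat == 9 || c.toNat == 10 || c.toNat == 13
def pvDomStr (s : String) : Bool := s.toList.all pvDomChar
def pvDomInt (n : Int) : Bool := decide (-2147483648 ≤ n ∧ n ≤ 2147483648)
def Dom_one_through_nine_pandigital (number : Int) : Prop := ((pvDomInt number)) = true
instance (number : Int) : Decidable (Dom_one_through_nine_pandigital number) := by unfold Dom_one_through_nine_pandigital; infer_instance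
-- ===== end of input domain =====

-- B replaces A's nested per-pair early-abort membership loops by one sort-and-compare
-- of the concatenated digit string against "123456789" (objective: simpler).

-- ===== PORT A =====
-- int(sqrt(number)): exact as Nat.sqrt for 0 ≤ number ≤ 2^31 (math.sqrt is correctly
-- rounded and these values are exactly representable); number < 0 raises (outside Pre_).
def pvIntSqrt (n : Int) : Int := (n.toNat.sqrt : Int)

-- int(digit) on a one-character string; under Pre_ the character is always a decimal
-- digit of str(number)/str(num_1)/str(num_2), where ofChars? is some (no ValueError).
def pvDigitVal (c : Char) : Int := (PySem.Int.ofChars? [c]).getD 0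

-- int(number/i): exact float division here since i divides number and 0 ≤ number ≤ 2^31 < 2^53.
def get_multiplicand_and_multiplier (number : Int) : List (Int × Int) :=
  (PySem.List.pyRange 1 (pvIntSqrt number + 1) 1).foldl
    (fun result i =>
      if PySem.Int.mod number i == 0 then result ++ [(i, PySem.Int.floordiv number i)]
      else result) []

-- the digit-scanning loop of A ('restart'/early return modelled as none); the same code
-- appears three times in A (over str(number), str(num_1), str(num_2))
def pvScanDigits : List Char → List Int → Option (List Int)
  | [], acc => some acc
  | c :: rest, acc =>
    if pvDigitVal c ∈ acc ∨ pvDigitVal c = 0 then none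
    else pvScanDigits rest (acc ++ [pvDigitVal c])

def pvPairsLoopA (numbers : List (Int × Int)) (numsList : List Int) : Bool :=
  match numbers with
  | [] => false
  | (n1, n2) :: rest =>
    match pvScanDigits (PySem.Int.toChars n1) numsList with
    | none => pvPairsLoopA rest numsList
    | some t1 =>
      match pvScanDigits (PySem.Int.toChars n2) t1 with
      | none => pvPairsLoopA rest numsList
      | some t2 => if t2.length = 9 then true else pvPairsLoopA rest numsList

def one_through_nine_pandigital (number : Int) : Bool :=
  let numbers := get_multiplicand_and_multiplier number
  match pvScanDigits (PySem.Int.toChars number) [] with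
  | none => false
  | some numsList => pvPairsLoopA numbers numsList

-- ===== PORT B =====
def pvPairsB (number : Int) : List (Int × Int) :=
  ((PySem.List.pyRange 1 (pvIntSqrt number + 1) 1).filter
    (fun i => PySem.Int.mod number i == 0)).map
    (fun i => (i, PySem.Int.floordiv number i))

-- B's validation loop over str(number) (early return False modelled as none)
def pvSeenLoopB : List Char → List Int → Option (List Int)
  | [], seen => some seen
  | c :: rest, seen =>
    if pvDigitVal c ∈ seen ∨ pvDigitVal c = 0 then none
    else pvSeenLoopB rest (seen ++ [pvDigitVal c])

def one_through_nine_pandigital_alt (number : Int) : Bool :=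
  let pairs := pvPairsB number
  match pvSeenLoopB (PySem.Int.toChars number) [] with
  | none => false
  | some _ =>
    let s := PySem.Int.toChars number
    pairs.any (fun p =>
      decide (PySem.List.sorted (s ++ PySem.Int.toChars p.1 ++ PySem.Int.toChars p.2)
        (fun x => x) false = "123456789".toList))

-- ===== PRECONDITION & SPEC =====
-- math.sqrt raises ValueError (math domain error) for number < 0, before anything is returned.
def Pre_one_through_nine_pandigital (number : Int) : Prop := 0 ≤ number
instance (number : Int) : Decidable (Pre_one_through_nine_pandigital number) := by unfold Pre_one_through_nine_pandigital; infer_instance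
def pvWitness_one_through_nine_pandigital : Int := (7254)

def Spec_one_through_nine_pandigital (number : Int) (out : Bool) : Prop := out = one_through_nine_pandigital_alt number
instance (number : Int) (out : Bool) : Decidable (Spec_one_through_nine_pandigital number out) := by unfold Spec_one_through_nine_pandigital; infer_instance

-- ===== CLAIM (what is proved, stated in full; the proofs are below) =====
def Claim_equal_one_through_nine_pandigital : Prop := ∀ (number : Int), Dom_one_through_nine_pandigital number → Pre_one_through_nine_pandigital number → Spec_one_through_nine_pandigital number (one_through_nine_pandigital number)

-- ===== LEMMAS AND PROOFS =====

-- the ten decimal digit characters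
def pvDigits : List Char := ['0', '1', '2', '3', '4', '5', '6', '7', '8', '9']

-- "123456789" as a char list
def pvNine : List Char := ['1', '2', '3', '4', '5', '6', '7', '8', '9']

theorem pv_digitChar_mem (d : Nat) (h : d < 10) : Nat.digitChar d ∈ pvDigits := by
  interval_cases d <;> decide

theorem pv_toDigitsCore_mem (fuel : Nat) : ∀ (n : Nat) (ds : List Char) (c : Char),
    c ∈ Nat.toDigitsCore 10 fuel n ds → c ∈ ds ∨ c ∈ pvDigits := by
  induction fuel with
  | zero => intro n ds c h; exact Or.inl h
  | succ f ih =>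
    intro n ds c h
    simp only [Nat.toDigitsCore] at h
    split at h
    · rcases List.mem_cons.mp h with h1 | h1
      · exact Or.inr (h1 ▸ pv_digitChar_mem _ (Nat.mod_lt _ (by norm_num)))
      · exact Or.inl h1
    · rcases ih _ _ _ h with h' | h'
      · rcases List.mem_cons.mp h' with h1 | h1
        · exact Or.inr (h1 ▸ pv_digitChar_mem _ (Nat.mod_lt _ (by norm_num)))
        · exact Or.inl h1
      · exact Or.inr h'

theorem pv_toChars_mem (n : Int) (hn : 0 ≤ n) (c : Char)
    (h : c ∈ PySem.Int.toChars n) : c ∈ pvDigits := by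
  unfold PySem.Int.toChars at h
  rw [if_neg (by omega)] at h
  rcases pv_toDigitsCore_mem _ _ _ _ h with h' | h'
  · simp at h'
  · exact h'

-- pvScanDigits succeeds exactly when the new digits are nonzero and keep everything distinct
theorem pv_scan_eq (cs : List Char) : ∀ (acc : List Int), acc.Nodup →
    pvScanDigits cs acc =
      if (acc ++ cs.map pvDigitVal).Nodup ∧ ∀ c ∈ cs, pvDigitVal c ≠ 0 then
        some (acc ++ cs.map pvDigitVal)
      else none := by
  induction cs with
  | nil => intro acc hacc; simp [pvScanDigits, hacc]
  | cons c rest ih =>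
    intro acc hacc
    by_cases hc : pvDigitVal c ∈ acc ∨ pvDigitVal c = 0
    · rw [pvScanDigits, if_pos hc, if_neg]
      rintro ⟨hnd, hz⟩
      rcases hc with hc | hc
      · rw [List.nodup_append] at hnd
        exact hnd.2.2 _ hc _ (by simp) rfl
      · exact hz c (by simp) hc
    · rw [not_or] at hc
      rw [pvScanDigits, if_neg (by simpa using hc)]
      rw [ih (acc ++ [pvDigitVal c]) (by
        simp only [List.nodup_append, List.nodup_singleton, List.mem_singleton]
        exact ⟨hacc, trivial, fun a ha b hb => hb ▸ fun e => hc.1 (e ▸ ha)⟩)]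
      have hassoc : acc ++ [pvDigitVal c] ++ rest.map pvDigitVal
          = acc ++ (c :: rest).map pvDigitVal := by simp
      rw [hassoc]
      congr 1
      simp only [List.mem_cons, eq_iff_iff]
      constructor
      · rintro ⟨hh1, hh2⟩
        refine ⟨hh1, fun x hx => ?_⟩
        rcases hx with rfl | hx
        · exact hc.2
        · exact hh2 x hx
      · rintro ⟨hh1, hh2⟩
        exact ⟨hh1, fun x hx => hh2 x (Or.inr hx)⟩

theorem pv_seen_eq_scan (cs : List Char) : ∀ acc, pvSeenLoopB cs acc = pvScanDigits cs acc := by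
  induction cs with
  | nil => intro acc; rfl
  | cons c rest ih =>
    intro acc
    rw [pvSeenLoopB, pvScanDigits]
    split
    · rfl
    · exact ih _

theorem pv_pairs_eq (number : Int) : get_multiplicand_and_multiplier number = pvPairsB number := by
  unfold get_multiplicand_and_multiplier pvPairsB
  rw [PySem.List.foldl_append_if]
  simp

theorem pv_digit_ne_zero (c : Char) (hd : c ∈ pvDigits) (hz : pvDigitVal c ≠ 0) : c ∈ pvNine := by
  fin_cases hd <;> first | (exfalso; exact hz (by decide)) | decide

theorem pv_nine_digit (c : Char) (h : c ∈ pvNine) : pvDigitVal c ≠ 0 := by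
  fin_cases h <;> decide

-- the bridge: distinct nonzero digit values of length 9 ↔ sorted chars = "123456789"
theorem pv_bridge (cs : List Char) (hd : ∀ c ∈ cs, c ∈ pvDigits) :
    ((cs.map pvDigitVal).Nodup ∧ (∀ c ∈ cs, pvDigitVal c ≠ 0) ∧ cs.length = 9) ↔
      PySem.List.sorted cs (fun x => x) false = "123456789".toList := by
  have hnine : ("123456789".toList : List Char) = pvNine := by decide
  constructor
  · rintro ⟨hnd, hz, hlen⟩
    have hcsnd : cs.Nodup := hnd.of_map
    have hsub : cs ⊆ pvNine := fun c hc => pv_digit_ne_zero c (hd c hc) (hz c hc)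
    have hperm : cs.Perm pvNine :=
      (List.subperm_of_subset hcsnd hsub).perm_of_length_le (by rw [hlen]; decide)
    rw [hnine]
    exact PySem.List.sorted_eq_of_perm_of_pairwise_lt cs pvNine (fun x => x)
      hperm.symm (by decide)
  · intro hs
    have hperm : cs.Perm pvNine := by
      refine (PySem.List.sorted_id_eq_sorted_id_iff_perm (xs := cs) (ys := pvNine)).mp ?_
      rw [hs, hnine]; decide
    have hmem : ∀ c ∈ cs, c ∈ pvNine := fun c hc => hperm.subset hc
    refine ⟨?_, fun c hc => pv_nine_digit c (hmem c hc), by simpa using hperm.length_eq⟩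
    have : (cs.map pvDigitVal).Perm (pvNine.map pvDigitVal) := hperm.map _
    rw [this.nodup_iff]
    decide

-- per-pair equivalence of A's two scanning loops and B's sorted comparison
theorem pv_pair_iff (N : List Char) (L : List Int) (a b : Int)
    (hL : L = N.map pvDigitVal) (hnd : L.Nodup) (hz : ∀ c ∈ N, pvDigitVal c ≠ 0)
    (hN : ∀ c ∈ N, c ∈ pvDigits) (ha : 0 ≤ a) (hb : 0 ≤ b) :
    (match pvScanDigits (PySem.Int.toChars a) L with
     | none => false
     | some t1 =>
       match pvScanDigits (PySem.Int.toChars b) t1 with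
       | none => false
       | some t2 => if t2.length = 9 then true else false) =
    decide (PySem.List.sorted (N ++ PySem.Int.toChars a ++ PySem.Int.toChars b)
      (fun x => x) false = "123456789".toList) := by
  subst hL
  have hA1 : ∀ c ∈ PySem.Int.toChars a, c ∈ pvDigits := fun c hc => pv_toChars_mem a ha c hc
  have hA2 : ∀ c ∈ PySem.Int.toChars b, c ∈ pvDigits := fun c hc => pv_toChars_mem b hb c hc
  have hall : ∀ c ∈ N ++ PySem.Int.toChars a ++ PySem.Int.toChars b, c ∈ pvDigits := by
    intro c hc
    rcases List.mem_append.mp hc with hc | hc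
    · rcases List.mem_append.mp hc with hc | hc
      · exact hN c hc
      · exact hA1 c hc
    · exact hA2 c hc
  have hQiff := pv_bridge (N ++ PySem.Int.toChars a ++ PySem.Int.toChars b) hall
  rw [pv_scan_eq _ _ hnd]
  by_cases h1 : ((N.map pvDigitVal ++ (PySem.Int.toChars a).map pvDigitVal).Nodup ∧
      ∀ c ∈ PySem.Int.toChars a, pvDigitVal c ≠ 0)
  · rw [if_pos h1]
    show (match pvScanDigits (PySem.Int.toChars b)
        (N.map pvDigitVal ++ (PySem.Int.toChars a).map pvDigitVal) with
      | none => false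
      | some t2 => if t2.length = 9 then true else false) = _
    rw [pv_scan_eq _ _ h1.1]
    by_cases h2 : ((N.map pvDigitVal ++ (PySem.Int.toChars a).map pvDigitVal ++
        (PySem.Int.toChars b).map pvDigitVal).Nodup ∧
        ∀ c ∈ PySem.Int.toChars b, pvDigitVal c ≠ 0)
    · rw [if_pos h2]
      show (if (N.map pvDigitVal ++ (PySem.Int.toChars a).map pvDigitVal ++
          (PySem.Int.toChars b).map pvDigitVal).length = 9 then true else false) = _
      have hnz : ∀ c ∈ N ++ PySem.Int.toChars a ++ PySem.Int.toChars b, pvDigitVal c ≠ 0 := by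
        intro c hc
        rcases List.mem_append.mp hc with hc | hc
        · rcases List.mem_append.mp hc with hc | hc
          · exact hz c hc
          · exact h1.2 c hc
        · exact h2.2 c hc
      by_cases hlen : (N.map pvDigitVal ++ (PySem.Int.toChars a).map pvDigitVal ++
          (PySem.Int.toChars b).map pvDigitVal).length = 9
      · rw [if_pos hlen]
        have hP := hQiff.mp ⟨by simpa [List.map_append] using h2.1, hnz, by simpa using hlen⟩
        exact (decide_eq_true hP).symm
      · rw [if_neg hlen]
        have hlen' : ¬ (N ++ PySem.Int.toChars a ++ PySem.Int.toChars b).length = 9 := by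
          simpa using hlen
        exact (decide_eq_false (fun hP => hlen' (hQiff.mpr hP).2.2)).symm
    · rw [if_neg h2]
      show false = _
      refine (decide_eq_false (fun hP => ?_)).symm
      obtain ⟨qnd, qnz, -⟩ := hQiff.mpr hP
      exact h2 ⟨by simpa [List.map_append] using qnd,
        fun c hc => qnz c (List.mem_append.mpr (Or.inr hc))⟩
  · rw [if_neg h1]
    show false = _
    refine (decide_eq_false (fun hP => ?_)).symm
    obtain ⟨qnd, qnz, -⟩ := hQiff.mpr hP
    have qnd' : (N.map pvDigitVal ++ (PySem.Int.toChars a).map pvDigitVal ++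
        (PySem.Int.toChars b).map pvDigitVal).Nodup := by simpa [List.map_append] using qnd
    exact h1 ⟨qnd'.of_append_left,
      fun c hc => qnz c (List.mem_append.mpr (Or.inl (List.mem_append.mpr (Or.inr hc))))⟩

-- the outer loops agree
theorem pv_outer (pairs : List (Int × Int)) (N : List Char) (L : List Int)
    (hL : L = N.map pvDigitVal) (hnd : L.Nodup) (hz : ∀ c ∈ N, pvDigitVal c ≠ 0)
    (hN : ∀ c ∈ N, c ∈ pvDigits)
    (hp : ∀ p ∈ pairs, 0 ≤ p.1 ∧ 0 ≤ p.2) :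
    pvPairsLoopA pairs L =
      pairs.any (fun p =>
        decide (PySem.List.sorted (N ++ PySem.Int.toChars p.1 ++ PySem.Int.toChars p.2)
          (fun x => x) false = "123456789".toList)) := by
  induction pairs with
  | nil => rfl
  | cons p rest ih =>
    obtain ⟨a, b⟩ := p
    have hab := hp (a, b) (by simp)
    have hpair := pv_pair_iff N L a b hL hnd hz hN hab.1 hab.2
    rw [List.any_cons, ← ih (fun q hq => hp q (List.mem_cons_of_mem _ hq))]
    rw [pvPairsLoopA]
    rcases h1 : pvScanDigits (PySem.Int.toChars a) L with _ | t1
    · simp only [h1] at hpair ⊢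
      rw [← hpair]
      simp
    · rcases h2 : pvScanDigits (PySem.Int.toChars b) t1 with _ | t2
      · simp only [h1, h2] at hpair ⊢
        rw [← hpair]
        simp
      · simp only [h1, h2] at hpair ⊢
        by_cases hl : t2.length = 9
        · rw [if_pos hl] at hpair ⊢
          rw [← hpair]
          simp
        · rw [if_neg hl] at hpair ⊢
          rw [← hpair]
          simp

theorem pv_pairs_nonneg (number : Int) (hn : 0 ≤ number) :
    ∀ p ∈ pvPairsB number, 0 ≤ p.1 ∧ 0 ≤ p.2 := by
  intro p hp
  unfold pvPairsB at hp
  simp only [List.mem_map, List.mem_filter] at hp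
  obtain ⟨i, ⟨hir, _⟩, rfl⟩ := hp
  rw [PySem.List.mem_pyRange_one] at hir
  refine ⟨by omega, ?_⟩
  rw [PySem.Int.floordiv_eq_ediv_of_pos (by omega)]
  exact Int.ediv_nonneg hn (by omega)

-- ===== VERDICT (by name: the statement is the Claim_ definition above) =====
theorem one_through_nine_pandigital_spec : Claim_equal_one_through_nine_pandigital := by
  intro number _ hpre
  unfold Spec_one_through_nine_pandigital
  unfold one_through_nine_pandigital one_through_nine_pandigital_alt
  rw [pv_pairs_eq, pv_seen_eq_scan]
  rcases h : pvScanDigits (PySem.Int.toChars number) [] with _ | L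
  · rfl
  · simp only []
    have hN : ∀ c ∈ PySem.Int.toChars number, c ∈ pvDigits :=
      fun c hc => pv_toChars_mem number hpre c hc
    rw [pv_scan_eq _ [] (by simp)] at h
    split at h
    · rename_i hcond
      simp only [List.nil_append, Option.some.injEq] at h
      exact pv_outer _ _ _ h.symm (h ▸ hcond.1) hcond.2 hN
        (pv_pairs_nonneg number hpre)
    · exact absurd h (by simp)
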